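-- pv_equiv track=rewrite | github.com/ulleea/evgeniyB03-908 | lesson8/№3.py | func
-- ===== SOURCE A (Python) =====
-- def func(s,n):
--     from itertools import permutations
--     a=[]
--     for j in range(1,n+1):
--         r=[]
--         for i in permutations(s, j):
--             r.append(''.join(i))
--         r=sorted(r)
--         a.extend(r)
--     return a
-- ===== SOURCE B (Python) =====
-- def func(s, n):
--     # Iterative frontier expansion: keep the list of (partial string, unused
--     # characters) pairs for the current length and extend it by one character
--     # per round, instead of enumerating permutations from scratch per length.
--     out = []
--     level = [("", s)]
--     for _ in range(n):
--         level = [(p + rem[i], rem[:i] + rem[i + 1:])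
--                  for (p, rem) in level
--                  for i in range(len(rem))]
--         out.extend(sorted(p for (p, _) in level))
--     return out
-- ===== Notes on version B (the rewrite author's own statement) =====
-- stated objective: alternative
-- what changed: Replaces the per-length itertools.permutations enumeration with an iterative breadth-first frontier of (prefix, remaining-characters) pairs that is extended by one character each round, so level j is built from level j-1 instead of from scratch.
import Mathlib
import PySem

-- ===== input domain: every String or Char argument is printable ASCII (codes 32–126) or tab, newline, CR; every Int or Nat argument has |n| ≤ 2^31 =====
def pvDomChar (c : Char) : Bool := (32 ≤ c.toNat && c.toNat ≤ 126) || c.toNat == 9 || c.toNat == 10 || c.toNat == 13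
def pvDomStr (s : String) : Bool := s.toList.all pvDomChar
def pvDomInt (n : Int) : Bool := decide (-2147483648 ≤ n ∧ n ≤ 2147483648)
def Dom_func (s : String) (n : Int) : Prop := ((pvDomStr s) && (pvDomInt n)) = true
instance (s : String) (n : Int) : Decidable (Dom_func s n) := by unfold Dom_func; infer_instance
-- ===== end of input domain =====

-- B replaces the per-length itertools.permutations enumeration by an iterative
-- frontier of (prefix, remaining) pairs extended one character per round
-- (alternative decomposition, same results; each length group still sorted).


-- ===== PORT A =====
-- hand port of itertools.permutations(s, j) (PySem has no primitive for it):
-- pickA lists, in index order, each element paired with the rest of the list;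
-- permsA emits the length-j selections in itertools' index-lexicographic order
-- — exact, including duplicate multiplicity for repeated characters.
def pickA : List Char → List (Char × List Char)
  | [] => []
  | x :: xs => (x, xs) :: (pickA xs).map (fun p => (p.1, x :: p.2))

def permsA (xs : List Char) : Nat → List (List Char)
  | 0 => [[]]
  | j + 1 => (pickA xs).flatMap (fun p => (permsA p.2 j).map (p.1 :: ·))

def func (s : String) (n : Int) : List String :=
  (PySem.List.pyRange 1 (n + 1) 1).foldl
    (fun a j =>
      -- j ∈ range(1, n+1), so 1 ≤ j and j.toNat is exact;
      -- the for-append loop over permutations with ''.join is the map below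
      let r := (permsA s.toList j.toNat).map (fun i => String.ofList i)
      let r := PySem.List.sorted r (fun x => x) false
      a ++ r) []

-- ===== PORT B =====
-- one round of Source B's comprehension: extend every (prefix, remaining) pair by
-- each still-unused character; strings are carried as List Char (exact), every
-- index i is in range so getD is exact and rem[:i]+rem[i+1:] = take i ++ drop (i+1)
def stepB (lvl : List (List Char × List Char)) : List (List Char × List Char) :=
  lvl.flatMap (fun pr =>
    (List.range pr.2.length).map (fun i =>
      (pr.1 ++ [pr.2.getD i ' '], pr.2.take i ++ pr.2.drop (i + 1))))

def func_alt (s : String) (n : Int) : List String :=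
  ((PySem.List.pyRange 0 n 1).foldl
    (fun (st : List (List Char × List Char) × List String) _ =>
      let lvl := stepB st.1
      (lvl, st.2 ++ PySem.List.sorted (lvl.map (fun pr => String.ofList pr.1)) (fun x => x) false))
    ([([], s.toList)], [])).2

-- ===== PRECONDITION & SPEC =====
def Spec_func (s : String) (n : Int) (out : List String) : Prop := out = func_alt s n
instance (s : String) (n : Int) (out : List String) : Decidable (Spec_func s n out) := by unfold Spec_func; infer_instance

-- ===== CLAIM (what is proved, stated in full; the proofs are below) =====
def Claim_equal_func : Prop := ∀ (s : String) (n : Int), Dom_func s n → Spec_func s n (func s n)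

-- ===== LEMMAS AND PROOFS =====

-- B's range/index/slice comprehension body is exactly pickA
theorem range_pick (rem : List Char) :
    (List.range rem.length).map (fun i => (rem.getD i ' ', rem.take i ++ rem.drop (i + 1)))
      = pickA rem := by
  induction rem with
  | nil => simp [pickA]
  | cons x xs ih =>
      simp only [List.length_cons, List.range_succ_eq_map, List.map_cons, List.map_map]
      simp only [pickA, ← ih, List.map_map]
      refine List.cons_eq_cons.mpr ⟨by simp, ?_⟩
      refine List.map_congr_left (fun i hi => ?_)
      simp [Function.comp, List.take_succ_cons, List.drop_succ_cons, Nat.succ_eq_add_one]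

theorem stepB_eq (lvl : List (List Char × List Char)) :
    stepB lvl = lvl.flatMap (fun pr => (pickA pr.2).map (fun cr => (pr.1 ++ [cr.1], cr.2))) := by
  unfold stepB
  refine List.flatMap_congr (fun pr hpr => ?_)
  rw [← range_pick pr.2, List.map_map]
  rfl

-- stepB commutes with prepending a fixed prefix to every partial string
theorem stepB_prefix (p : List Char) (lvl : List (List Char × List Char)) :
    stepB (lvl.map (fun pr => (p ++ pr.1, pr.2)))
      = (stepB lvl).map (fun pr => (p ++ pr.1, pr.2)) := by
  simp only [stepB, List.flatMap_map, List.map_flatMap]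
  refine List.flatMap_congr (fun pr hpr => ?_)
  simp [List.map_map, Function.comp]

theorem stepB_append (l1 l2 : List (List Char × List Char)) :
    stepB (l1 ++ l2) = stepB l1 ++ stepB l2 := by
  simp [stepB]

theorem stepB_iter_nil (j : Nat) : stepB^[j] [] = [] := by
  induction j with
  | zero => rfl
  | succ j ih => rw [Function.iterate_succ_apply, stepB]; simpa using ih

theorem stepB_iter_append (j : Nat) (l1 l2 : List (List Char × List Char)) :
    stepB^[j] (l1 ++ l2) = stepB^[j] l1 ++ stepB^[j] l2 := by
  induction j generalizing l1 l2 with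
  | zero => simp
  | succ j ih => simp [Function.iterate_succ_apply, stepB_append, ih]

theorem stepB_iter_flatMap (j : Nat) (l : List (List Char × List Char)) :
    stepB^[j] l = l.flatMap (fun e => stepB^[j] [e]) := by
  induction l with
  | nil => simp [stepB_iter_nil]
  | cons e rest ih =>
      have h : e :: rest = [e] ++ rest := rfl
      rw [h, stepB_iter_append, ih]; simp

theorem stepB_iter_prefix (j : Nat) (p : List Char) (lvl : List (List Char × List Char)) :
    stepB^[j] (lvl.map (fun pr => (p ++ pr.1, pr.2)))
      = (stepB^[j] lvl).map (fun pr => (p ++ pr.1, pr.2)) := by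
  induction j generalizing lvl with
  | zero => simp
  | succ j ih => simp [Function.iterate_succ_apply, stepB_prefix, ih]

-- the frontier after j rounds carries exactly the length-j permutations, in order
theorem iter_fst (j : Nat) (xs : List Char) :
    (stepB^[j] [(([] : List Char), xs)]).map Prod.fst = permsA xs j := by
  induction j generalizing xs with
  | zero => simp [permsA]
  | succ j ih =>
      rw [Function.iterate_succ_apply]
      have h1 : stepB [(([] : List Char), xs)]
          = (pickA xs).map (fun cr => ([cr.1], cr.2)) := by
        rw [stepB_eq]; simp
      rw [h1, stepB_iter_flatMap, List.flatMap_map, List.map_flatMap]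
      show _ = permsA xs (j + 1)
      rw [permsA]
      refine List.flatMap_congr (fun cr hcr => ?_)
      have h2 : [([cr.1], cr.2)]
          = ([(([] : List Char), cr.2)]).map (fun pr => ([cr.1] ++ pr.1, pr.2)) := by simp
      rw [h2, stepB_iter_prefix, List.map_map, ← ih cr.2]
      simp [List.map_map, Function.comp]

-- closed form of B's fold: frontier = stepB^[m], output = A-shaped concatenation
theorem foldB_closed (xs : List Char) (m : Nat) :
    (List.range m).foldl
      (fun (st : List (List Char × List Char) × List String) (_ : Nat) =>
        let lvl := stepB st.1
        (lvl, st.2 ++ PySem.List.sorted (lvl.map (fun pr => String.ofList pr.1)) (fun x => x) false))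
      ([([], xs)], [])
    = (stepB^[m] [(([] : List Char), xs)],
       (List.range m).foldl
         (fun (a : List String) (k : Nat) =>
           a ++ PySem.List.sorted ((permsA xs (k + 1)).map (fun i => String.ofList i)) (fun x => x) false)
         []) := by
  induction m with
  | zero => simp
  | succ m ih =>
      rw [List.range_succ, List.foldl_append, List.foldl_append, ih]
      simp only [List.foldl_cons, List.foldl_nil]
      refine Prod.ext ?_ ?_
      · simp [Function.iterate_succ_apply']
      · show _ ++ _ = _ ++ _
        congr 1
        rw [← Function.iterate_succ_apply' stepB m, ← iter_fst (m + 1) xs]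
        rw [List.map_map]
        simp only [Nat.succ_eq_add_one]
        rfl

theorem main_eq (s : String) (n : Int) : func s n = func_alt s n := by
  unfold func func_alt
  rw [PySem.List.pyRange_one, PySem.List.pyRange_one]
  have h1 : (n + 1 - 1).toNat = n.toNat := by omega
  have h2 : (n - 0).toNat = n.toNat := by omega
  rw [h1, h2, List.foldl_map, List.foldl_map, foldB_closed]
  have hf : (fun (a : List String) (k : Nat) =>
        a ++ PySem.List.sorted ((permsA s.toList (1 + (k : Int)).toNat).map (fun i => String.ofList i)) (fun x => x) false)
      = (fun (a : List String) (k : Nat) =>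
        a ++ PySem.List.sorted ((permsA s.toList (k + 1)).map (fun i => String.ofList i)) (fun x => x) false) := by
    funext a k
    have hk : (1 + (k : Int)).toNat = k + 1 := by omega
    rw [hk]
  rw [hf]

-- ===== VERDICT (by name: the statement is the Claim_ definition above) =====
theorem func_spec : Claim_equal_func := by
  intro s n _
  unfold Spec_func
  exact main_eq s n
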